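-- pv_equiv track=rewrite | github.com/godfredO/dsa | findUniqueBinaryString.py | dfs
-- ===== SOURCE A (Python) =====
-- def dfs(idx, current, n, words):
--     if idx == n:
--         word = "".join(current)
--         if word not in words:
--             return word
--         return None
--
--     left = current + ['0']
--     leftIdx = idx + 1
--     value = dfs(leftIdx, left, n, words)
--     if value:
--         return value
--
--     #backtrack and go right
--     right = current + ['1']
--     rightIdx = idx + 1
--     value = dfs(rightIdx, right, n, words)
--     if value:
--         return value
--
--     return None
-- ===== SOURCE B (Python) =====
-- def dfs(idx, current, n, words):
--     # Scan suffix values 0,1,2,... numerically instead of recursing over a tree: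
--     # the first missing n-bit extension is found within len(words)+1 candidates.
--     m = n - idx
--     prefix = "".join(current)
--     if m == 0:
--         return prefix if prefix not in words else None
--     present = set(words)
--     for k in range(len(words) + 1):
--         if k.bit_length() > m:  # all 2**m suffixes are taken
--             return None
--         cand = prefix + format(k, "b").zfill(m)
--         if cand not in present:
--             return cand
--     return None  # unreachable: len(words)+1 distinct candidates cannot all be present
-- ===== Notes on version B (the rewrite author's own statement) =====
-- stated objective: faster
-- what changed: Replaces the recursive backtracking DFS over the binary suffix tree (worst-case exponential list-membership probing) by a single numeric scan: build a set of the words once, then try suffix values k = 0,1,2,... (formatted as m-bit binary strings) and return the first candidate not in the set, which must occur within len(words)+1 tries by pigeonhole.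
import Mathlib
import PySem

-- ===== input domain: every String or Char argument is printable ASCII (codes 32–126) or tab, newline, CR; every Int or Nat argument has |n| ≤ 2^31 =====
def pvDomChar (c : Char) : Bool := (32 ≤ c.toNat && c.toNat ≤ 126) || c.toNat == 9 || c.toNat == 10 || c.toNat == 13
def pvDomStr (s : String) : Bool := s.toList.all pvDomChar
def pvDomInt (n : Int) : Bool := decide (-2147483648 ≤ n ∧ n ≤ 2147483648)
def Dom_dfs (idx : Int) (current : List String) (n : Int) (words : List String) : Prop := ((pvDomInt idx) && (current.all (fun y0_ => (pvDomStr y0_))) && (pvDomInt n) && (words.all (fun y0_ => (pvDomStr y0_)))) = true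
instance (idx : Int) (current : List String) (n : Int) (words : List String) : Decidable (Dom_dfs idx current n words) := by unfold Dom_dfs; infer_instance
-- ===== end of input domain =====

-- B replaces A's backtracking DFS over the suffix tree by a numeric scan of at most
-- len(words)+1 candidate suffix values (the first missing one wins); return values agree.

-- ===== PORT A =====
-- Python truthiness of `value` (an Optional[str]): None and "" are falsy.
def dfsTruthy (v : Option String) : Bool :=
  match v with
  | some s => !(s == "")
  | none => false

-- Fuel = remaining recursion depth n - idx; exact for idx ≤ n (Pre_dfs); for idx > n the
-- Python recursion never reaches idx == n and never returns.
def dfsFuel : Nat → Int → List String → Int → List String → Option String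
  | fuel, idx, current, n, words =>
    if idx = n then
      let word := PySem.Str.join "" current
      if word ∉ words then some word else none
    else
      match fuel with
      | 0 => none
      | f + 1 =>
        let value := dfsFuel f (idx + 1) (current ++ ["0"]) n words
        if dfsTruthy value then value
        else
          let value2 := dfsFuel f (idx + 1) (current ++ ["1"]) n words
          if dfsTruthy value2 then value2
          else none

def dfs (idx : Int) (current : List String) (n : Int) (words : List String) : Option String :=
  dfsFuel (n - idx).toNat idx current n words

-- ===== PORT B =====
-- the loop `for k in range(len(words)+1): ...` of Source B
def dfsAltLoop (m : Int) (pre : String) (present : PySem.Set String) : List Int → Option String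
  | [] => none
  | k :: ks =>
    if (PySem.Int.bitLength k : Int) > m then none   -- k.bit_length() > m: all 2**m suffixes taken
    else
      let cand := pre ++ PySem.Str.zfill (PySem.Int.toBin k) m
      if cand ∉ present then some cand
      else dfsAltLoop m pre present ks

def dfs_alt (idx : Int) (current : List String) (n : Int) (words : List String) : Option String :=
  let m := n - idx
  let pre := PySem.Str.join "" current
  if m = 0 then
    if pre ∉ words then some pre else none
  else
    dfsAltLoop m pre (PySem.Set.ofList words) (PySem.List.pyRange 0 ((words.length : Int) + 1) 1)

-- ===== PRECONDITION & SPEC =====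
-- Pre_ excludes idx > n, where the Python A recurses forever (idx only grows, never reaching n).
def Pre_dfs (idx : Int) (current : List String) (n : Int) (words : List String) : Prop := idx ≤ n
instance (idx : Int) (current : List String) (n : Int) (words : List String) : Decidable (Pre_dfs idx current n words) := by unfold Pre_dfs; infer_instance

def pvWitness_dfs : Int × List String × Int × List String := (0, [], 2, ["00", "01"])

def Spec_dfs (idx : Int) (current : List String) (n : Int) (words : List String) (out : Option String) : Prop := out = dfs_alt idx current n words
instance (idx : Int) (current : List String) (n : Int) (words : List String) (out : Option String) : Decidable (Spec_dfs idx current n words out) := by unfold Spec_dfs; infer_instance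

-- ===== CLAIM (what is proved, stated in full; the proofs are below) =====
def Claim_equal_dfs : Prop := ∀ (idx : Int) (current : List String) (n : Int) (words : List String), Dom_dfs idx current n words → Pre_dfs idx current n words → Spec_dfs idx current n words (dfs idx current n words)

-- ===== LEMMAS AND PROOFS =====

-- canonical binary digits of k, MSB first (what format(k, "b") produces)
def binChars (k : Nat) : List Char :=
  if k < 2 then [Nat.digitChar k] else binChars (k / 2) ++ [Nat.digitChar (k % 2)]
decreasing_by exact Nat.div_lt_self (by omega) (by omega)

-- the M-bit zero-padded binary representation of k (< 2^M), MSB first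
def bitsM : Nat → Nat → List Char
  | 0, _ => []
  | M+1, k => (if k < 2^M then '0' else '1') :: bitsM M (k % 2^M)

-- all M-char binary suffixes, in the order A's DFS visits them
def sfx : Nat → List (List Char)
  | 0 => [[]]
  | M+1 => (sfx M).map ('0' :: ·) ++ (sfx M).map ('1' :: ·)

theorem joinNil (ls : List (List Char)) : PySem.Chars.join [] ls = ls.flatten := by
  simp only [PySem.Chars.join, List.intercalate]
  induction ls with
  | nil => simp
  | cons a t ih => cases t <;> simp_all [List.intersperse]

theorem strJoin_empty (current : List String) :
    PySem.Str.join "" current = String.ofList ((current.map String.toList).flatten) := by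
  simp [PySem.Str.join, joinNil]

theorem ofList_inj {l1 l2 : List Char} (h : String.ofList l1 = String.ofList l2) : l1 = l2 := by
  have := congrArg String.toList h; simpa using this

theorem ofList_append (l1 l2 : List Char) :
    String.ofList l1 ++ String.ofList l2 = String.ofList (l1 ++ l2) := by simp

theorem binChars_mem : ∀ k c, c ∈ binChars k → c = '0' ∨ c = '1' := by
  intro k
  induction k using Nat.strong_induction_on with
  | _ k ih =>
    intro c hc
    rw [binChars] at hc
    by_cases h2 : k < 2
    · simp only [h2, if_pos, List.mem_singleton] at hc
      interval_cases k <;> simp_all [Nat.digitChar]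
    · simp only [h2, if_neg, ite_false, List.mem_append, List.mem_singleton] at hc
      rcases hc with hc | hc
      · exact ih (k / 2) (Nat.div_lt_self (by omega) (by omega)) c hc
      · have : k % 2 = 0 ∨ k % 2 = 1 := by omega
        rcases this with h | h <;> simp [hc, h, Nat.digitChar]

theorem binChars_ne_nil (k : Nat) : binChars k ≠ [] := by
  rw [binChars]; split <;> simp

theorem toDigitsCore_eq : ∀ f k acc, k < f → Nat.toDigitsCore 2 f k acc = binChars k ++ acc := by
  intro f
  induction f with
  | zero => omega
  | succ f ih =>
    intro k acc hk
    rw [Nat.toDigitsCore]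
    by_cases h2 : k < 2
    · have hz : k / 2 = 0 := by omega
      have hm : k % 2 = k := by omega
      simp only [hz, hm, if_pos rfl]
      rw [binChars]; simp [h2]
    · have hz : ¬ (k / 2 = 0) := by omega
      simp only [hz, ite_false, if_neg]
      rw [ih (k / 2) _ (by omega)]
      conv_rhs => rw [binChars]
      simp [h2]

theorem toDigits_two (k : Nat) : Nat.toDigits 2 k = binChars k := by
  have := toDigitsCore_eq (k + 1) k [] (by omega)
  simpa [Nat.toDigits] using this

theorem toBin_cast (k : Nat) : PySem.Int.toBin (k : Int) = String.ofList (binChars k) := by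
  have hng : ¬ ((k : Int) < 0) := by omega
  simp [PySem.Int.toBin, PySem.Int.toBinChars, toDigits_two, hng]

theorem zfill_eq_pad (M k : Nat) :
    PySem.Chars.zfill (binChars k) (M : Int) =
      List.replicate (M - (binChars k).length) '0' ++ binChars k := by
  obtain ⟨c, rest, h⟩ : ∃ c rest, binChars k = c :: rest := by
    rcases hbc : binChars k with _ | ⟨c, rest⟩
    · exact absurd hbc (binChars_ne_nil k)
    · exact ⟨c, rest, rfl⟩
  have hc : c = '0' ∨ c = '1' := binChars_mem k c (by rw [h]; exact List.mem_cons_self ..)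
  have hsign : ¬ (c = '+' ∨ c = '-') := by rcases hc with h' | h' <;> simp [h']
  have htn : ((M : Int)).toNat = M := by omega
  rw [PySem.Chars.zfill.eq_def, h]
  by_cases hle : (M : Int) ≤ (rest.length : Int) + 1
  · have h0 : M - (rest.length + 1) = 0 := by omega
    simp [hle, h0]
  · simp [hle, hsign, htn]

theorem bitsM_length (M : Nat) : ∀ k, (bitsM M k).length = M := by
  induction M with
  | zero => intro k; rfl
  | succ M ih => intro k; simp [bitsM, ih]

theorem bitsM_mix : ∀ M j, j < 2^(M+1) → bitsM (M+1) j = bitsM M (j / 2) ++ [Nat.digitChar (j % 2)] := by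
  intro M
  induction M with
  | zero =>
    intro j hj
    interval_cases j <;> simp [bitsM, Nat.digitChar]
  | succ M ih =>
    intro j hj
    have hp : (0:Nat) < 2^(M+1) := Nat.pow_pos (by omega)
    have hdiv : j % 2^(M+1) / 2 = j / 2 % 2^M := by
      have h := Nat.mod_mul_right_div_self j 2 (2^M)
      have h2 : 2 * 2^M = 2^(M+1) := by ring
      rw [h2] at h; exact h
    have hmod : j % 2^(M+1) % 2 = j % 2 := Nat.mod_mod_of_dvd j (dvd_pow_self 2 (by omega))
    have h2 : 2^(M+1+1) = 2 * 2^(M+1) := by ring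
    have h2' : 2^(M+1) = 2 * 2^M := by ring
    have hcond : (j < 2^(M+1)) ↔ (j / 2 < 2^M) := by omega
    show (if j < 2^(M+1) then '0' else '1') :: bitsM (M+1) (j % 2^(M+1)) = _
    rw [ih (j % 2^(M+1)) (Nat.mod_lt _ hp), hdiv, hmod]
    show _ = (if j / 2 < 2^M then '0' else '1') :: bitsM M (j / 2 % 2^M) ++ [Nat.digitChar (j % 2)]
    rw [List.cons_append]
    congr 1
    simp only [hcond]

theorem binChars_high : ∀ M j, j < 2^M → binChars (2^M + j) = '1' :: bitsM M j := by
  intro M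
  induction M with
  | zero =>
    intro j hj
    interval_cases j
    rw [binChars]; simp [bitsM, Nat.digitChar]
  | succ M ih =>
    intro j hj
    have h2 : 2^(M+1) = 2 * 2^M := by ring
    have hge : ¬ (2^(M+1) + j < 2) := by
      have := Nat.one_le_two_pow (n := M); omega
    rw [binChars]
    simp only [hge, ite_false, if_neg]
    have hdiv : (2^(M+1) + j) / 2 = 2^M + j / 2 := by omega
    have hmod : (2^(M+1) + j) % 2 = j % 2 := by omega
    rw [hdiv, hmod, ih (j / 2) (by omega), bitsM_mix M j hj]
    rfl

theorem pad_eq_bits : ∀ M k, k < 2^(M+1) →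
    List.replicate ((M+1) - (binChars k).length) '0' ++ binChars k = bitsM (M+1) k := by
  intro M
  induction M with
  | zero =>
    intro k hk
    interval_cases k <;> (rw [binChars]; simp [bitsM, Nat.digitChar])
  | succ M ih =>
    intro k hk
    by_cases hlt : k < 2^(M+1)
    · have hIH := ih k hlt
      have hlen : (binChars k).length ≤ M + 1 := by
        have hl := congrArg List.length hIH
        simp [bitsM_length] at hl
        omega
      have hrep : (M+1+1) - (binChars k).length = ((M+1) - (binChars k).length) + 1 := by omega
      have hmod : k % 2^(M+1) = k := Nat.mod_eq_of_lt hlt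
      rw [hrep, List.replicate_succ, List.cons_append, hIH]
      show _ = (if k < 2^(M+1) then '0' else '1') :: bitsM (M+1) (k % 2^(M+1))
      simp [hlt, hmod]
    · have h2 : 2^(M+1+1) = 2 * 2^(M+1) := by ring
      have hj : k - 2^(M+1) < 2^(M+1) := by omega
      have hk' : 2^(M+1) + (k - 2^(M+1)) = k := by omega
      have hbc : binChars k = '1' :: bitsM (M+1) (k - 2^(M+1)) := by
        have hb := binChars_high (M+1) (k - 2^(M+1)) hj
        rw [hk'] at hb
        exact hb
      have hlen : (binChars k).length = M + 2 := by simp [hbc, bitsM_length]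
      have hmod : k % 2^(M+1) = k - 2^(M+1) := by
        have hb : (2^(M+1) + (k - 2^(M+1))) % 2^(M+1) = k - 2^(M+1) := by
          rw [Nat.add_mod_left]; exact Nat.mod_eq_of_lt hj
        rw [hk'] at hb
        exact hb
      rw [hlen]
      show List.replicate ((M+2) - (M+2)) '0' ++ binChars k
          = (if k < 2^(M+1) then '0' else '1') :: bitsM (M+1) (k % 2^(M+1))
      simp [hbc, hlt, hmod]

theorem sfx_eq : ∀ M, sfx M = (List.range (2^M)).map (bitsM M) := by
  intro M
  induction M with
  | zero => simp [sfx, bitsM]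
  | succ M ih =>
    have h2 : 2^(M+1) = 2^M + 2^M := by ring
    rw [sfx, ih, h2, List.range_add, List.map_append, List.map_map, List.map_map, List.map_map]
    congr 1
    · apply List.map_congr_left
      intro k hk
      simp only [List.mem_range] at hk
      simp [Function.comp, bitsM, hk, Nat.mod_eq_of_lt hk]
    · apply List.map_congr_left
      intro k hk
      simp only [List.mem_range] at hk
      have hge : ¬ (2^M + k < 2^M) := by omega
      simp [Function.comp, bitsM, hge, Nat.add_mod_left, Nat.mod_eq_of_lt hk]

theorem bitsM_inj : ∀ M k1 k2, k1 < 2^M → k2 < 2^M → bitsM M k1 = bitsM M k2 → k1 = k2 := by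
  intro M
  induction M with
  | zero => intro k1 k2 h1 h2 _; omega
  | succ M ih =>
    intro k1 k2 h1 h2 heq
    simp only [bitsM, List.cons.injEq] at heq
    obtain ⟨hhead, htail⟩ := heq
    have hp : (0:Nat) < 2^M := Nat.pow_pos (by omega)
    have h2' : 2^(M+1) = 2 * 2^M := by ring
    have hmods := ih (k1 % 2^M) (k2 % 2^M) (Nat.mod_lt _ hp) (Nat.mod_lt _ hp) htail
    by_cases hc1 : k1 < 2^M
    · have hc2 : k2 < 2^M := by by_contra hc2; simp [hc1, hc2] at hhead
      rw [Nat.mod_eq_of_lt hc1, Nat.mod_eq_of_lt hc2] at hmods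
      exact hmods
    · have hc2 : ¬ k2 < 2^M := by by_contra hc2; simp [hc1, hc2] at hhead
      have hm1 : k1 % 2^M = k1 - 2^M := by
        have hb : (2^M + (k1 - 2^M)) % 2^M = k1 - 2^M := by
          rw [Nat.add_mod_left]; exact Nat.mod_eq_of_lt (by omega)
        rw [show 2^M + (k1 - 2^M) = k1 by omega] at hb
        exact hb
      have hm2 : k2 % 2^M = k2 - 2^M := by
        have hb : (2^M + (k2 - 2^M)) % 2^M = k2 - 2^M := by
          rw [Nat.add_mod_left]; exact Nat.mod_eq_of_lt (by omega)
        rw [show 2^M + (k2 - 2^M) = k2 by omega] at hb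
        exact hb
      omega

theorem nodup_subset_length {l l' : List String} (h1 : l.Nodup) (h2 : l ⊆ l') :
    l.length ≤ l'.length := by
  calc l.length = l.toFinset.card := (List.toFinset_card_of_nodup h1).symm
    _ ≤ l'.toFinset.card := Finset.card_le_card (by intro x hx; simp at hx ⊢; exact h2 hx)
    _ ≤ l'.length := l'.toFinset_card_le

-- a find? over strings of the shape pre ++ c :: t is truthy iff it is some
theorem truthy_find (pre : List Char) (c : Char) (L : List (List Char)) (words : List String) :
    dfsTruthy (((L.map (c :: ·)).map (fun s => String.ofList (pre ++ s))).find?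
        (fun w => !decide (w ∈ words))) =
      ((((L.map (c :: ·)).map (fun s => String.ofList (pre ++ s))).find?
        (fun w => !decide (w ∈ words)))).isSome := by
  cases hv : ((L.map (c :: ·)).map (fun s => String.ofList (pre ++ s))).find?
      (fun w => !decide (w ∈ words)) with
  | none => simp [dfsTruthy]
  | some w =>
    have hmem := List.mem_of_find?_eq_some hv
    simp only [List.map_map, List.mem_map] at hmem
    obtain ⟨t, _, hw⟩ := hmem
    have hw' : w = String.ofList (pre ++ c :: t) := by
      simpa [Function.comp] using hw.symm
    have hne : w ≠ "" := by
      intro h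
      rw [h] at hw'
      have := congrArg String.toList hw'
      simp at this
    simp [dfsTruthy, hne]

-- characterization of A: the DFS returns the first candidate (in suffix order) not in words
theorem dfs_char : ∀ (M : Nat) (idx : Int) (current : List String) (n : Int) (words : List String),
    n = idx + (M : Int) →
    dfsFuel M idx current n words =
      ((sfx M).map (fun s =>
          String.ofList ((current.map String.toList).flatten ++ s))).find?
        (fun w => !decide (w ∈ words)) := by
  intro M
  induction M with
  | zero =>
    intro idx current n words hn
    have hidx : idx = n := by omega
    rw [dfsFuel]
    simp only [hidx, if_pos rfl, sfx, List.map, List.append_nil, strJoin_empty]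
    by_cases hmem : String.ofList ((current.map String.toList).flatten) ∈ words <;>
      simp [hmem, List.find?]
  | succ M ih =>
    intro idx current n words hn
    have hidx : ¬ (idx = n) := by omega
    rw [dfsFuel]
    simp only [hidx, ite_false, if_neg]
    have h0 := ih (idx + 1) (current ++ ["0"]) n words (by omega)
    have h1 := ih (idx + 1) (current ++ ["1"]) n words (by omega)
    have hflat0 : (((current ++ ["0"]).map String.toList).flatten) =
        (current.map String.toList).flatten ++ ['0'] := by simp
    have hflat1 : (((current ++ ["1"]).map String.toList).flatten) =
        (current.map String.toList).flatten ++ ['1'] := by simp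
    rw [hflat0] at h0
    rw [hflat1] at h1
    have hm0 : ((sfx M).map (fun s => String.ofList (((current.map String.toList).flatten ++ ['0']) ++ s))) =
        (((sfx M).map ('0' :: ·)).map (fun s => String.ofList ((current.map String.toList).flatten ++ s))) := by
      rw [List.map_map]; apply List.map_congr_left; intro s _
      simp only [Function.comp]
      congr 1
      simp
    have hm1 : ((sfx M).map (fun s => String.ofList (((current.map String.toList).flatten ++ ['1']) ++ s))) =
        (((sfx M).map ('1' :: ·)).map (fun s => String.ofList ((current.map String.toList).flatten ++ s))) := by
      rw [List.map_map]; apply List.map_congr_left; intro s _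
      simp only [Function.comp]
      congr 1
      simp
    rw [hm0] at h0
    rw [hm1] at h1
    conv_rhs => rw [sfx, List.map_append, List.find?_append]
    rw [h0, h1, truthy_find, truthy_find]
    cases hF0 : (((sfx M).map ('0' :: ·)).map
        (fun s => String.ofList ((current.map String.toList).flatten ++ s))).find?
        (fun w => !decide (w ∈ words)) with
    | some w => simp [hF0]
    | none =>
      cases hF1 : (((sfx M).map ('1' :: ·)).map
          (fun s => String.ofList ((current.map String.toList).flatten ++ s))).find?
          (fun w => !decide (w ∈ words)) with
      | some w => simp [hF0, hF1]
      | none => simp [hF0, hF1]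

-- B's loop is a find? over the candidates taken while the guard admits them
theorem loop_eq (m : Int) (pre : String) (present : PySem.Set String) :
    ∀ ks : List Int, dfsAltLoop m pre present ks =
      ((ks.takeWhile (fun k => !decide ((PySem.Int.bitLength k : Int) > m))).map
          (fun k => pre ++ PySem.Str.zfill (PySem.Int.toBin k) m)).find?
        (fun w => !decide (w ∈ present)) := by
  intro ks
  induction ks with
  | nil => rfl
  | cons k ks ih =>
    rw [dfsAltLoop]
    by_cases hg : (PySem.Int.bitLength k : Int) > m
    · simp [hg, List.takeWhile_cons]
    · by_cases hc : (pre ++ PySem.Str.zfill (PySem.Int.toBin k) m) ∈ present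
      · simp [hg, hc, List.takeWhile_cons, List.find?_cons, ih]
      · simp [hg, hc, List.takeWhile_cons, List.find?_cons]

theorem pyRange_shift : ∀ (t : Nat) (a : Int),
    PySem.List.pyRange a (a + (t : Int)) 1 = (List.range t).map (fun (i : Nat) => a + (i : Int)) := by
  intro t
  induction t with
  | zero =>
    intro a
    simp [PySem.List.pyRange_one_eq_nil]
  | succ t ih =>
    intro a
    have hlt : a < a + ((t + 1 : Nat) : Int) := by push_cast; omega
    rw [PySem.List.pyRange_one_cons hlt]
    have harg : a + ((t + 1 : Nat) : Int) = (a + 1) + (t : Int) := by push_cast; ring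
    rw [harg, ih (a + 1), List.range_succ_eq_map, List.map_cons, List.map_map]
    congr 1
    · simp
    apply List.map_congr_left
    intro i _
    simp only [Function.comp]
    push_cast
    ring

theorem pyRange_zero_succ (W : Nat) :
    PySem.List.pyRange 0 ((W : Int) + 1) 1 = (List.range (W + 1)).map (fun (i : Nat) => (i : Int)) := by
  have h := pyRange_shift (W + 1) 0
  have harg : (0 : Int) + ((W + 1 : Nat) : Int) = (W : Int) + 1 := by push_cast; ring
  rw [harg] at h
  rw [h]
  apply List.map_congr_left
  intro i _
  omega

theorem guard_eq (M : Nat) : ∀ k : Nat,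
    (!decide ((PySem.Int.bitLength (k : Int) : Int) > (M : Int))) = decide (k < 2^M) := by
  intro k
  by_cases hlt : k < 2^M
  · have hle : PySem.Int.bitLength (k : Int) ≤ M := by
      by_contra hgt
      rw [not_le] at hgt
      by_cases hk0 : k = 0
      · rw [hk0] at hgt; simp [PySem.Int.bitLength_zero] at hgt
      · have h1 := PySem.Int.two_pow_bitLength_le (k : Int) (by exact_mod_cast hk0)
        have h2 : (2:Nat)^M ≤ 2^(PySem.Int.bitLength (k : Int) - 1) :=
          Nat.pow_le_pow_right (by omega) (by omega)
        simp only [Int.natAbs_natCast] at h1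
        omega
    have : ¬ ((PySem.Int.bitLength (k : Int) : Int) > (M : Int)) := by exact_mod_cast not_lt.mpr (by exact_mod_cast hle)
    simp [this, hlt]
  · have hgt : M < PySem.Int.bitLength (k : Int) := by
      by_contra hle
      rw [not_lt] at hle
      have h1 := PySem.Int.lt_two_pow_bitLength (k : Int)
      simp only [Int.natAbs_natCast] at h1
      have h2 : (2:Nat)^(PySem.Int.bitLength (k : Int)) ≤ 2^M :=
        Nat.pow_le_pow_right (by omega) hle
      omega
    have : ((PySem.Int.bitLength (k : Int) : Int) > (M : Int)) := by exact_mod_cast hgt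
    simp [this, hlt]

theorem takeWhile_range' (c : Nat) : ∀ (t s : Nat),
    (List.range' s t).takeWhile (fun k => decide (k < c)) = List.range' s (min t (c - s)) := by
  intro t
  induction t with
  | zero => intro s; simp
  | succ t ih =>
    intro s
    rw [List.range'_succ, List.takeWhile_cons]
    by_cases hs : s < c
    · have hmin : min (t+1) (c - s) = (min t (c - (s+1))) + 1 := by omega
      simp only [hs, decide_true, if_pos, ih (s+1), hmin, List.range'_succ]
    · have hmin : min (t+1) (c - s) = 0 := by omega
      simp [hs, hmin]

-- the candidate B builds for suffix value k (< 2^M, M ≥ 1) is prefix ++ bitsM M k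
theorem cand_eq (pre : List Char) (M' k : Nat) (hk : k < 2^(M'+1)) :
    String.ofList pre ++ PySem.Str.zfill (PySem.Int.toBin (k : Int)) ((M'+1 : Nat) : Int) =
      String.ofList (pre ++ bitsM (M'+1) k) := by
  rw [toBin_cast, PySem.Str.zfill]
  have htl : (String.ofList (binChars k)).toList = binChars k := by simp
  rw [htl, zfill_eq_pad, pad_eq_bits M' k hk, ofList_append]

-- pigeonhole: among the first len(words)+1 candidates one is missing from words
theorem find_some_of_small (pre : List Char) (words : List String) (M : Nat)
    (h : words.length + 1 ≤ 2^M) :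
    (((List.range (words.length + 1)).map (fun k => String.ofList (pre ++ bitsM M k))).find?
      (fun w => !decide (w ∈ words))).isSome := by
  by_contra h'
  rw [Option.not_isSome_iff_eq_none, List.find?_eq_none] at h'
  have hsub : ((List.range (words.length + 1)).map (fun k => String.ofList (pre ++ bitsM M k))) ⊆ words := by
    intro x hx
    have := h' x hx
    simpa using this
  have hnodup : ((List.range (words.length + 1)).map (fun k => String.ofList (pre ++ bitsM M k))).Nodup := by
    apply List.Nodup.map_on _ (List.nodup_range)
    intro k1 hk1 k2 hk2 heq
    simp only [List.mem_range] at hk1 hk2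
    exact bitsM_inj M k1 k2 (by omega) (by omega)
      (List.append_cancel_left (ofList_inj heq))
  have hlen := nodup_subset_length hnodup hsub
  rw [List.length_map, List.length_range] at hlen
  omega

-- ===== VERDICT (by name: the statement is the Claim_ definition above) =====
theorem dfs_spec : Claim_equal_dfs := by
  unfold Claim_equal_dfs
  intro idx current n words _ hpre
  unfold Pre_dfs at hpre
  unfold Spec_dfs
  show dfs idx current n words = dfs_alt idx current n words
  unfold dfs
  have hM : ∃ M : Nat, (n - idx).toNat = M := ⟨_, rfl⟩
  obtain ⟨M, hM⟩ := hM
  rw [hM]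
  have hn : n = idx + (M : Int) := by omega
  have hm : n - idx = (M : Int) := by omega
  rw [dfs_char M idx current n words hn]
  unfold dfs_alt
  rw [hm]
  dsimp only
  cases M with
  | zero =>
    rw [if_pos (by norm_num)]
    simp only [sfx, List.map, List.append_nil, strJoin_empty]
    by_cases hmem : String.ofList ((current.map String.toList).flatten) ∈ words <;>
      simp [hmem, List.find?]
  | succ M' =>
    rw [if_neg (by omega : ¬ (((M' + 1 : Nat) : Int) = 0))]
    rw [loop_eq, pyRange_zero_succ, List.takeWhile_map]
    have hguard : ((fun k => !decide ((PySem.Int.bitLength k : Int) > ((M' + 1 : Nat) : Int))) ∘ (fun i : Nat => (i : Int)))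
        = (fun k : Nat => decide (k < 2^(M'+1))) := by
      funext k
      exact guard_eq (M'+1) k
    rw [hguard, List.range_eq_range', takeWhile_range' (2^(M'+1)) (words.length + 1) 0]
    simp only [Nat.sub_zero]
    rw [← List.range_eq_range', List.map_map]
    have hpred : (fun w => !decide (w ∈ PySem.Set.ofList words)) = (fun w : String => !decide (w ∈ words)) := by
      funext w
      simp [PySem.Set.mem_ofList]
    rw [hpred, strJoin_empty]
    have hcands : ((List.range (min (words.length + 1) (2^(M'+1)))).map
          ((fun k => String.ofList ((current.map String.toList).flatten) ++ PySem.Str.zfill (PySem.Int.toBin k) ((M'+1 : Nat) : Int)) ∘ (fun i : Nat => (i : Int))))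
        = ((List.range (min (words.length + 1) (2^(M'+1)))).map
          (fun k => String.ofList ((current.map String.toList).flatten ++ bitsM (M'+1) k))) := by
      apply List.map_congr_left
      intro k hk
      simp only [List.mem_range] at hk
      exact cand_eq (current.map String.toList).flatten M' k (by omega)
    rw [hcands, sfx_eq, List.map_map]
    have hX : ((fun s => String.ofList ((current.map String.toList).flatten ++ s)) ∘ bitsM (M'+1))
        = (fun k => String.ofList ((current.map String.toList).flatten ++ bitsM (M'+1) k)) := rfl
    rw [hX]
    by_cases hcase : 2^(M'+1) ≤ words.length + 1
    · rw [min_eq_right hcase]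
    · have hmin : min (words.length + 1) (2^(M'+1)) = words.length + 1 := by omega
      rw [hmin]
      have hsplit : 2^(M'+1) = (words.length + 1) + (2^(M'+1) - (words.length + 1)) := by omega
      rw [hsplit, List.range_add, List.map_append, List.find?_append]
      have hsome := find_some_of_small (current.map String.toList).flatten words (M'+1) (by omega)
      cases hfind : ((List.range (words.length + 1)).map
          (fun k => String.ofList ((current.map String.toList).flatten ++ bitsM (M'+1) k))).find?
          (fun w => !decide (w ∈ words)) with
      | none => rw [hfind] at hsome; simp at hsome
      | some w => simp [hfind]
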